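-- pv_equiv track=rewrite | github.com/lulamzamo/xGL_pub | src/xGLUtil.py | sMetrics
-- ===== SOURCE A (Python) =====
-- def boundary(seg):
--     i = 0
--     bound = []
--     for c in seg:
--         if c == '-':
--             bound[i-1] = '1'
--         else:
--             bound.append('0')
--             i += 1
--     bound.pop()
--     return "".join(bound)
--
-- def sMetrics(s1,s2):
--     res =  [0,0,0,0] # {'tp':0,'fp':0,'tn':0,'fn':0}
--     b1 = boundary(s1)
--     b2 = boundary(s2)
--
--     for i in range(len(b2)):
--         if b1[i]=='1' == b2[i]:
--             res[0] += 1
--         elif b1[i]=='1' and b2[i]=='0':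
--             res[1] += 1
--         elif b1[i]=='0' == b2[i]:
--             res[2] += 1
--         elif b1[i]=='0' and b2[i]=='1' :
--             res[3] += 1
--         else:
--             raise ValueError
--     return res
-- ===== SOURCE B (Python) =====
-- def boundary(seg):
--     i = 0
--     bound = []
--     for c in seg:
--         if c == '-':
--             bound[i-1] = '1'
--         else:
--             bound.append('0')
--             i += 1
--     bound.pop()
--     return "".join(bound)
--
--
-- def sMetrics(s1, s2):
--     b1 = boundary(s1)
--     b2 = boundary(s2)
--     n = len(b2)
--     S1 = {i for i in range(n) if b1[i] == '1'}
--     S2 = {i for i in range(n) if b2[i] == '1'}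
--     res = [len(S1 & S2), len(S1 - S2), 0, len(S2 - S1)]
--     res[2] = n - res[0] - res[1] - res[3]
--     return res
-- ===== Notes on version B (the rewrite author's own statement) =====
-- stated objective: simpler
-- what changed: Replaces the four-way branch-and-count loop with boundary-index sets: build the sets of '1' positions of b1 and b2 over range(len(b2)) and read the confusion counts off set intersection/differences, deriving the true-negative count arithmetically.
import Mathlib
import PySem

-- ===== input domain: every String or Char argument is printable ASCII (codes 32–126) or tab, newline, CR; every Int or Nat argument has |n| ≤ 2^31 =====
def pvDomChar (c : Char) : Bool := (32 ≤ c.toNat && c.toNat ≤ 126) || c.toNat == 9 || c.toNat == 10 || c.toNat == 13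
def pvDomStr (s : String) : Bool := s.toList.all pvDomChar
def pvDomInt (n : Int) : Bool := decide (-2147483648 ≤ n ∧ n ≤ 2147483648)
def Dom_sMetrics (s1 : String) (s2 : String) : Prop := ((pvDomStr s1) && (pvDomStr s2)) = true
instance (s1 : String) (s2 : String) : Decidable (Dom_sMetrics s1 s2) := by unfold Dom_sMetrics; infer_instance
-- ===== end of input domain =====

-- B replaces A's four-way branch-and-count loop by sets of '1'-positions and reads the counts
-- off intersection/differences (objective: simpler); return values proved equal on Pre_.


-- ===== PORT A =====
-- helper 'boundary' of Source A, shared verbatim by Source B; 'none' marks Python's IndexError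
-- (bound[i-1] on an empty list, or bound.pop() on an empty list)
def boundStep (st : Option (Int × List Char)) (c : Char) : Option (Int × List Char) :=
  match st with
  | none => none
  | some (i, bound) =>
    if c = '-' then
      match PySem.List.pySet? bound (i - 1) '1' with
      | none => none
      | some b => some (i, b)
    else some (i + 1, bound ++ ['0'])

def boundaryPy (seg : String) : Option String :=
  match seg.toList.foldl boundStep (some (0, [])) with
  | none => none
  | some (_, bound) =>
    match bound with
    | [] => none                            -- bound.pop() raises IndexError
    | _ => some (String.ofList bound.dropLast) -- pop the last element, join the rest

-- res[k] += 1 for a literal in-range k: exact for Python's list assignment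
def incAt (res : List Int) (k : Nat) : List Int := res.set k (res.getD k 0 + 1)

-- loop body of A; i ranges over range(len(b2)), so i ≥ 0 and b1[i]/b2[i] = l[i]? (none = IndexError)
def sStep (l1 l2 : List Char) (res : Option (List Int)) (i : Nat) : Option (List Int) :=
  match res with
  | none => none
  | some res =>
    match l1[i]?, l2[i]? with
    | some c1, some c2 =>
      if c1 = '1' ∧ c2 = '1' then some (incAt res 0)
      else if c1 = '1' ∧ c2 = '0' then some (incAt res 1)
      else if c1 = '0' ∧ c2 = '0' then some (incAt res 2)
      else if c1 = '0' ∧ c2 = '1' then some (incAt res 3)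
      else none                             -- raise ValueError
    | _, _ => none

def sMetrics (s1 : String) (s2 : String) : List Int :=
  match boundaryPy s1, boundaryPy s2 with
  | some b1, some b2 =>
    ((List.range b2.toList.length).foldl (sStep b1.toList b2.toList) (some [0, 0, 0, 0])).getD []
    -- none (an exception) is unreachable inside Pre_
  | _, _ => []                              -- boundary raised; excluded by Pre_

-- ===== PORT B =====
def sMetrics_alt (s1 : String) (s2 : String) : List Int :=
  match boundaryPy s1, boundaryPy s2 with
  | some b1, some b2 =>
    let l1 := b1.toList
    let l2 := b2.toList
    let n := l2.length
    if l1.length < n then []                -- b1[i] raises IndexError in the set builder; excluded by Pre_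
    else
      -- the index sets are subsets of range(n), hence duplicate-free: list length = set size
      let S1 := (List.range n).filter (fun i => l1.getD i ' ' = '1')
      let S2 := (List.range n).filter (fun i => l2.getD i ' ' = '1')
      let r0 : Int := (S1.filter (fun i => i ∈ S2)).length      -- len(S1 & S2)
      let r1 : Int := (S1.filter (fun i => i ∉ S2)).length      -- len(S1 - S2)
      let r3 : Int := (S2.filter (fun i => i ∉ S1)).length      -- len(S2 - S1)
      [r0, r1, (n : Int) - r0 - r1 - r3, r3]
  | _, _ => []

-- ===== PRECONDITION & SPEC =====
-- Pre_ excludes exactly the inputs where A raises IndexError: an empty argument or one starting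
-- with '-' (boundary raises), or boundary(s1) shorter than boundary(s2) (b1[i] raises).
def Pre_sMetrics (s1 : String) (s2 : String) : Prop :=
  s1.toList ≠ [] ∧ s2.toList ≠ [] ∧
  s1.toList.head? ≠ some '-' ∧ s2.toList.head? ≠ some '-' ∧
  (s2.toList.filter (fun c => c ≠ '-')).length ≤ (s1.toList.filter (fun c => c ≠ '-')).length
instance (s1 : String) (s2 : String) : Decidable (Pre_sMetrics s1 s2) := by
  unfold Pre_sMetrics; infer_instance

def pvWitness_sMetrics : String × String := ("aa-bb cc", "aa bb-cc")

def Spec_sMetrics (s1 : String) (s2 : String) (out : List Int) : Prop := out = sMetrics_alt s1 s2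
instance (s1 : String) (s2 : String) (out : List Int) : Decidable (Spec_sMetrics s1 s2 out) := by
  unfold Spec_sMetrics; infer_instance

-- ===== CLAIM (what is proved, stated in full; the proofs are below) =====
def Claim_equal_sMetrics : Prop := ∀ (s1 : String) (s2 : String), Dom_sMetrics s1 s2 → Pre_sMetrics s1 s2 → Spec_sMetrics s1 s2 (sMetrics s1 s2)

-- ===== LEMMAS AND PROOFS =====

-- invariant of the 'boundary' fold: the counter equals the list length, the list stays
-- nonempty and binary, and its length counts the non-'-' characters seen
theorem bfold (l : List Char) : ∀ (bound : List Char),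
    bound ≠ [] → (∀ c ∈ bound, c = '0' ∨ c = '1') →
    ∃ bound', l.foldl boundStep (some ((bound.length : Int), bound)) =
        some ((bound'.length : Int), bound') ∧
      bound' ≠ [] ∧ (∀ c ∈ bound', c = '0' ∨ c = '1') ∧
      bound'.length = bound.length + (l.filter (fun c => c ≠ '-')).length := by
  induction l with
  | nil => intro bound h1 h3; exact ⟨bound, rfl, h1, h3, by simp⟩
  | cons c t ih =>
    intro bound h1 h3
    by_cases hc : c = '-'
    · subst hc
      have hlen : 1 ≤ bound.length := List.length_pos_iff.mpr h1
      have hset : PySem.List.pySet? bound ((bound.length : Int) - 1) '1'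
          = some (bound.set (bound.length - 1) '1') := by
        have hcast : ((bound.length : Int) - 1) = ((bound.length - 1 : Nat) : Int) := by omega
        rw [hcast, PySem.List.pySet?_natCast]
        omega
      have hstep : boundStep (some ((bound.length : Int), bound)) '-'
          = some (((bound.set (bound.length - 1) '1').length : Int),
                  bound.set (bound.length - 1) '1') := by
        simp [boundStep, hset]
      obtain ⟨b', hfold, hne, hbin, hl⟩ := ih (bound.set (bound.length - 1) '1')
        (by simp [← List.length_pos_iff]; omega)
        (by intro x hx
            rcases List.mem_or_eq_of_mem_set hx with h | h
            · exact h3 x h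
            · right; exact h)
      refine ⟨b', ?_, hne, hbin, ?_⟩
      · rw [List.foldl_cons, hstep, hfold]
      · simpa using hl
    · have hstep : boundStep (some ((bound.length : Int), bound)) c
          = some (((bound ++ ['0']).length : Int), bound ++ ['0']) := by
        simp [boundStep, hc]
      obtain ⟨b', hfold, hne, hbin, hl⟩ := ih (bound ++ ['0'])
        (by simp)
        (by intro x hx
            rcases List.mem_append.mp hx with h | h
            · exact h3 x h
            · left; simpa using h)
      refine ⟨b', ?_, hne, hbin, ?_⟩
      · rw [List.foldl_cons, hstep, hfold]
      · rw [hl]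
        simp [hc]
        omega
    
-- characterization of boundaryPy on Pre_-admitted strings
theorem boundary_spec (s : String) (h1 : s.toList ≠ []) (h2 : s.toList.head? ≠ some '-') :
    ∃ b, boundaryPy s = some (String.ofList b.dropLast) ∧ b ≠ [] ∧
      (∀ c ∈ b, c = '0' ∨ c = '1') ∧
      b.length = (s.toList.filter (fun c => c ≠ '-')).length := by
  obtain ⟨c, t, hct⟩ := List.exists_cons_of_ne_nil h1
  have hc : c ≠ '-' := by rw [hct] at h2; simpa using h2
  have h0 : boundStep (some (0, [])) c = some (((['0'] : List Char).length : Int), ['0']) := by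
    simp [boundStep, hc]
  obtain ⟨b, hfold, hne, hbin, hlen⟩ := bfold t ['0'] (by simp) (by simp)
  refine ⟨b, ?_, hne, hbin, ?_⟩
  · unfold boundaryPy
    rw [hct, List.foldl_cons, h0, hfold]
    cases b with
    | nil => exact absurd rfl hne
    | cons x xs => rfl
  · rw [hlen, hct]
    simp [hc]
    omega

-- counting machinery shared by both readings of the loop
def cnt (p : Nat → Bool) (n : Nat) : Nat := ((List.range n).filter p).length

theorem cnt_succ (p : Nat → Bool) (n : Nat) :
    cnt p (n + 1) = cnt p n + (if p n then 1 else 0) := by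
  simp [cnt, List.range_succ, List.filter_append]
  split <;> simp_all

def pOne (l : List Char) (i : Nat) : Bool := decide (l.getD i ' ' = '1')

-- A's loop computes exactly the four counts
theorem aloop (l1 l2 : List Char) (hb1 : ∀ c ∈ l1, c = '0' ∨ c = '1')
    (hb2 : ∀ c ∈ l2, c = '0' ∨ c = '1') (n : Nat) (hn1 : n ≤ l1.length) (hn2 : n ≤ l2.length) :
    (List.range n).foldl (sStep l1 l2) (some [0, 0, 0, 0]) =
      some [(cnt (fun i => pOne l1 i && pOne l2 i) n : Int),
            (cnt (fun i => pOne l1 i && !pOne l2 i) n : Int),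
            (cnt (fun i => !pOne l1 i && !pOne l2 i) n : Int),
            (cnt (fun i => !pOne l1 i && pOne l2 i) n : Int)] := by
  induction n with
  | zero => simp [cnt]
  | succ m ih =>
    have hm1 : m < l1.length := by omega
    have hm2 : m < l2.length := by omega
    rw [List.range_succ, List.foldl_append, ih (by omega) (by omega)]
    have e1 : l1[m]? = some l1[m] := List.getElem?_eq_getElem hm1
    have e2 : l2[m]? = some l2[m] := List.getElem?_eq_getElem hm2
    have g1 : pOne l1 m = decide (l1[m] = '1') := by
      simp [pOne, List.getD_eq_getElem?_getD, List.getElem?_eq_getElem hm1]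
    have g2 : pOne l2 m = decide (l2[m] = '1') := by
      simp [pOne, List.getD_eq_getElem?_getD, List.getElem?_eq_getElem hm2]
    have hzo : ('0' : Char) ≠ '1' := by decide
    rcases hb1 l1[m] (List.getElem_mem hm1) with h1 | h1 <;>
      rcases hb2 l2[m] (List.getElem_mem hm2) with h2 | h2 <;>
        simp [sStep, List.foldl_cons, e1, e2, h1, h2, incAt, List.getD, cnt_succ, g1, g2, hzo]

-- every index falls in exactly one of the four classes
theorem cnt_total (p q : Nat → Bool) (n : Nat) :
    cnt (fun i => p i && q i) n + cnt (fun i => p i && !q i) n +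
      cnt (fun i => !p i && !q i) n + cnt (fun i => !p i && q i) n = n := by
  induction n with
  | zero => simp [cnt]
  | succ m ih =>
    rw [cnt_succ, cnt_succ, cnt_succ, cnt_succ]
    cases hp : p m <;> cases hq : q m <;> simp <;> omega

-- B's set intersection/difference sizes are the same counts
theorem filt_mem (p q : Nat → Bool) (n : Nat) :
    (((List.range n).filter p).filter (fun i => decide (i ∈ (List.range n).filter q))).length
      = cnt (fun i => p i && q i) n := by
  rw [List.filter_filter]
  unfold cnt
  congr 1
  apply List.filter_congr
  intro i hi
  simp [List.mem_filter, List.mem_range.mp hi, Bool.and_comm]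

theorem filt_notmem (p q : Nat → Bool) (n : Nat) :
    (((List.range n).filter p).filter (fun i => decide (i ∉ (List.range n).filter q))).length
      = cnt (fun i => p i && !q i) n := by
  rw [List.filter_filter]
  unfold cnt
  congr 1
  apply List.filter_congr
  intro i hi
  simp [List.mem_filter, List.mem_range.mp hi, Bool.and_comm]

theorem filt_notmem' (p q : Nat → Bool) (n : Nat) :
    (((List.range n).filter q).filter (fun i => decide (i ∉ (List.range n).filter p))).length
      = cnt (fun i => !p i && q i) n := by
  rw [List.filter_filter]
  unfold cnt
  congr 1
  apply List.filter_congr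
  intro i hi
  simp [List.mem_filter, List.mem_range.mp hi, Bool.and_comm]

theorem sMetrics_eq (s1 : String) (s2 : String) (hp : Pre_sMetrics s1 s2) :
    sMetrics s1 s2 = sMetrics_alt s1 s2 := by
  obtain ⟨h1, h2, hh1, hh2, hcnt⟩ := hp
  obtain ⟨b1, hb1eq, hb1ne, hb1bin, hb1len⟩ := boundary_spec s1 h1 hh1
  obtain ⟨b2, hb2eq, hb2ne, hb2bin, hb2len⟩ := boundary_spec s2 h2 hh2
  unfold sMetrics sMetrics_alt
  rw [hb1eq, hb2eq]
  simp only [String.toList_ofList]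
  have hl1 : 1 ≤ b1.length := List.length_pos_iff.mpr hb1ne
  have hl2 : 1 ≤ b2.length := List.length_pos_iff.mpr hb2ne
  have hd1 : b1.dropLast.length = b1.length - 1 := by simp
  have hd2 : b2.dropLast.length = b2.length - 1 := by simp
  have hn1 : b2.dropLast.length ≤ b1.dropLast.length := by rw [hd1, hd2]; omega
  have hbin1 : ∀ c ∈ b1.dropLast, c = '0' ∨ c = '1' :=
    fun c hc => hb1bin c ((List.dropLast_sublist b1).mem hc)
  have hbin2 : ∀ c ∈ b2.dropLast, c = '0' ∨ c = '1' :=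
    fun c hc => hb2bin c ((List.dropLast_sublist b2).mem hc)
  rw [aloop b1.dropLast b2.dropLast hbin1 hbin2 b2.dropLast.length hn1 le_rfl]
  rw [if_neg (by omega)]
  simp only [Option.getD_some, pOne]
  rw [filt_mem, filt_notmem, filt_notmem']
  have htot := cnt_total (fun i => decide (b1.dropLast.getD i ' ' = '1'))
    (fun i => decide (b2.dropLast.getD i ' ' = '1')) b2.dropLast.length
  have h2 : ((cnt (fun i => !decide (b1.dropLast.getD i ' ' = '1')
        && !decide (b2.dropLast.getD i ' ' = '1')) b2.dropLast.length : Nat) : Int)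
      = (b2.dropLast.length : Int)
        - (cnt (fun i => decide (b1.dropLast.getD i ' ' = '1')
            && decide (b2.dropLast.getD i ' ' = '1')) b2.dropLast.length : Nat)
        - (cnt (fun i => decide (b1.dropLast.getD i ' ' = '1')
            && !decide (b2.dropLast.getD i ' ' = '1')) b2.dropLast.length : Nat)
        - (cnt (fun i => !decide (b1.dropLast.getD i ' ' = '1')
            && decide (b2.dropLast.getD i ' ' = '1')) b2.dropLast.length : Nat) := by
    omega
  rw [h2]

-- ===== VERDICT (by name: the statement is the Claim_ definition above) =====
theorem sMetrics_spec : Claim_equal_sMetrics := by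
  intro s1 s2 _ hp
  unfold Spec_sMetrics
  exact sMetrics_eq s1 s2 hp
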